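-- pv_equiv track=rewrite | github.com/lin/lin.github.io | content/cp/cf/853/b.py | solve
-- ===== SOURCE A (Python) =====
-- def solve(n, s):
--     mismatch = False
--     found = False
--     for i in range(n//2):
--         if s[i] != s[~i]:
--             if found:
--                 return False
--             mismatch = True
--         else:
--             if mismatch:
--                 found = True
--
--     return True
-- ===== SOURCE B (Python) =====
-- def solve(n, s):
--     idx = [i for i in range(n // 2) if s[i] != s[~i]]
--     if not idx:
--         return True
--     return idx == list(range(idx[0], idx[-1] + 1))
-- ===== Notes on version B (the rewrite author's own statement) =====
-- stated objective: simpler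
-- what changed: Replaces A's in-loop mismatch/found state machine with early return by a two-stage decomposition: collect all mismatch indices, then check they form one contiguous run (idx == range(idx[0], idx[-1]+1)).
-- outside the precondition, e.g. on solve(100, 'bca'): A returns False, B raises IndexError
import Mathlib
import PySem

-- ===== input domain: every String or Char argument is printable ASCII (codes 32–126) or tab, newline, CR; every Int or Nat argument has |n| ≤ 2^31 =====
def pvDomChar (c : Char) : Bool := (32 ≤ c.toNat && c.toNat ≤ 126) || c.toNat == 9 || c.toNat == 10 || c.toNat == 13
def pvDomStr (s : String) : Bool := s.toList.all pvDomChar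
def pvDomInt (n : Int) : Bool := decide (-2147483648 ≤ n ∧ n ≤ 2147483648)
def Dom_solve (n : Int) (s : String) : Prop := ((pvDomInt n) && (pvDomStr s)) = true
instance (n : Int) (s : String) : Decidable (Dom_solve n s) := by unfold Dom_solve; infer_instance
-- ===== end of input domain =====

-- B replaces A's in-loop mismatch/found state machine (with early return) by a two-stage
-- decomposition: collect the mismatch indices, then check that they form one contiguous run.

-- ===== PORT A =====
-- the for-loop `for i in range(n//2)` of A, counter i with (n//2 - i) as fuel; state
-- (mismatch, found); the early `return False` is the value false; where Python's s[i]/s[~i]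
-- raises IndexError (outside Pre_solve) the loop stops (exact inside Pre_solve)
def solveGo (cs : List Char) : Nat → Int → Bool → Bool → Bool
  | 0, _, _, _ => true
  | k + 1, i, mismatch, found =>
    match PySem.List.pyGet? cs i, PySem.List.pyGet? cs (-i - 1) with
    | some x, some y =>
      if x ≠ y then
        if found then false else solveGo cs k (i + 1) true found
      else
        if mismatch then solveGo cs k (i + 1) mismatch true
        else solveGo cs k (i + 1) mismatch found
    | _, _ => false

def solve (n : Int) (s : String) : Bool :=
  solveGo s.toList (PySem.Int.floordiv n 2).toNat 0 false false

-- ===== PORT B =====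
-- idx = [i for i in range(n//2) if s[i] != s[~i]]; where Python's s[i]/s[~i] raises
-- IndexError (outside Pre_solve) the comprehension stops (exact inside Pre_solve)
def altIdx (cs : List Char) : Nat → Int → List Int
  | 0, _ => []
  | k + 1, i =>
    match PySem.List.pyGet? cs i, PySem.List.pyGet? cs (-i - 1) with
    | some x, some y => if x ≠ y then i :: altIdx cs k (i + 1) else altIdx cs k (i + 1)
    | _, _ => []

-- `[] → True`, else `idx == list(range(idx[0], idx[-1]+1))` (idx[-1] = rest.getLastD a)
def solve_alt (n : Int) (s : String) : Bool :=
  match altIdx s.toList (PySem.Int.floordiv n 2).toNat 0 with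
  | [] => true
  | a :: rest => decide (a :: rest = PySem.List.pyRange a (rest.getLastD a + 1) 1)

-- ===== PRECONDITION & SPEC =====
-- Pre_ excludes the inputs with n//2 > len(s), where the loop index goes past the string and
-- Python raises IndexError; on a few of these A still returns False, by returning early before
-- the out-of-range index is touched — those are excluded too (see cites).
def Pre_solve (n : Int) (s : String) : Prop :=
  PySem.Int.floordiv n 2 ≤ (s.toList.length : Int)
instance (n : Int) (s : String) : Decidable (Pre_solve n s) := by unfold Pre_solve; infer_instance

def pvWitness_solve : Int × String := (4, "abca")

def Spec_solve (n : Int) (s : String) (out : Bool) : Prop := out = solve_alt n s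
instance (n : Int) (s : String) (out : Bool) : Decidable (Spec_solve n s out) := by unfold Spec_solve; infer_instance

-- ===== CLAIM (what is proved, stated in full; the proofs are below) =====
def Claim_equal_solve : Prop := ∀ (n : Int) (s : String), Dom_solve n s → Pre_solve n s → Spec_solve n s (solve n s)

-- ===== LEMMAS AND PROOFS =====

-- consecutive integers a, a+1, …, a+k-1
def rngI (a : Int) (k : Nat) : List Int := (List.range k).map (fun (j : Nat) => a + (j : Int))

-- "the list is a contiguous run of integers starting at its head"
def isRunB : List Int → Bool
  | [] => true
  | x :: r => decide (x :: r = rngI x (r.length + 1))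

-- the mismatch test both programs share
def mp (cs : List Char) (i : Int) : Bool :=
  decide (PySem.List.pyGet? cs i ≠ PySem.List.pyGet? cs (-i - 1))

-- A's loop re-indexed over the explicit list of loop indices (proof layer)
def solveGoL (cs : List Char) : List Int → Bool → Bool → Bool
  | [], _, _ => true
  | i :: rest, mismatch, found =>
    if PySem.List.pyGet? cs i ≠ PySem.List.pyGet? cs (-i - 1) then
      if found then false else solveGoL cs rest true found
    else
      if mismatch then solveGoL cs rest mismatch true
      else solveGoL cs rest mismatch found

theorem rngI_succ (a : Int) (k : Nat) : rngI a (k + 1) = a :: rngI (a + 1) k := by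
  simp only [rngI, List.range_succ_eq_map, List.map_cons, List.map_map]
  congr 1
  · simp
  · apply List.map_congr_left; intro j _; simp [Function.comp]; ring

theorem mem_rngI {x a : Int} {k : Nat} (h : x ∈ rngI a k) : a ≤ x := by
  simp only [rngI, List.mem_map] at h
  obtain ⟨j, hj, rfl⟩ := h
  omega

theorem rngI_succ_right (a : Int) (k : Nat) : rngI a (k + 1) = rngI a k ++ [a + k] := by
  simp [rngI, List.range_succ]

theorem rngI_getLastD (a x : Int) (m : Nat) : (rngI a (m + 1)).getLastD x = a + m := by
  rw [rngI_succ_right]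
  simp

theorem pyRange_eq_rngI (a b : Int) : PySem.List.pyRange a b 1 = rngI a (b - a).toNat := by
  rw [PySem.List.pyRange_one]; simp [rngI]

-- inside the bounds both s[i] and s[~i] are defined
theorem pyGet?_both_some (cs : List Char) (i : Int) (h1 : 0 ≤ i) (h2 : i < cs.length) :
    ∃ x y, PySem.List.pyGet? cs i = some x ∧ PySem.List.pyGet? cs (-i - 1) = some y := by
  have hx : (PySem.List.pyGet? cs i).isSome := by
    rw [Option.isSome_iff_ne_none]
    intro hn
    rw [PySem.List.pyGet?_eq_none_iff] at hn
    simp [PySem.Raise.InRange] at hn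
    omega
  have hy : (PySem.List.pyGet? cs (-i - 1)).isSome := by
    rw [Option.isSome_iff_ne_none]
    intro hn
    rw [PySem.List.pyGet?_eq_none_iff] at hn
    simp [PySem.Raise.InRange] at hn
    omega
  exact ⟨_, _, Option.eq_some_of_isSome hx, Option.eq_some_of_isSome hy⟩

-- the fueled counter loop of port A is the list loop over rngI i k, inside the bounds
theorem solveGo_eq_solveGoL (cs : List Char) (k : Nat) :
    ∀ (i : Int) (m f : Bool), 0 ≤ i → i + k ≤ cs.length →
      solveGo cs k i m f = solveGoL cs (rngI i k) m f := by
  induction k with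
  | zero => intro i m f _ _; simp [solveGo, rngI, solveGoL]
  | succ k ih =>
    intro i m f h1 h2
    obtain ⟨x, y, hx, hy⟩ := pyGet?_both_some cs i h1 (by omega)
    rw [rngI_succ]
    simp only [solveGo, solveGoL, hx, hy]
    by_cases hxy : x ≠ y
    · simp only [if_pos hxy, if_pos (show some x ≠ some y by simpa using hxy)]
      cases f
      · simpa using ih (i + 1) true false (by omega) (by omega)
      · simp
    · simp only [if_neg hxy, if_neg (show ¬some x ≠ some y by simpa using hxy)]
      cases m
      · simpa using ih (i + 1) false f (by omega) (by omega)
      · simpa using ih (i + 1) true true (by omega) (by omega)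

-- the fueled comprehension of port B is the filter over rngI i k, inside the bounds
theorem altIdx_eq_filter (cs : List Char) (k : Nat) :
    ∀ (i : Int), 0 ≤ i → i + k ≤ cs.length →
      altIdx cs k i = (rngI i k).filter (mp cs) := by
  induction k with
  | zero => intro i _ _; simp [altIdx, rngI]
  | succ k ih =>
    intro i h1 h2
    obtain ⟨x, y, hx, hy⟩ := pyGet?_both_some cs i h1 (by omega)
    rw [rngI_succ]
    simp only [altIdx, hx, hy]
    by_cases hxy : x ≠ y
    · rw [if_pos hxy, List.filter_cons_of_pos (by simp [mp, hx, hy, hxy])]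
      rw [ih (i + 1) (by omega) (by omega)]
    · rw [if_neg hxy, List.filter_cons_of_neg (by simp [mp, hx, hy]; simpa using hxy)]
      exact ih (i + 1) (by omega) (by omega)

-- found = true: any further mismatch returns False, so result ⟺ no mismatch index remains
theorem solveGoL_found (cs : List Char) (l : List Int) (m : Bool) :
    solveGoL cs l m true = decide (l.filter (mp cs) = []) := by
  induction l generalizing m with
  | nil => simp [solveGoL]
  | cons i rest ih =>
    by_cases h : PySem.List.pyGet? cs i ≠ PySem.List.pyGet? cs (-i - 1)
    · rw [List.filter_cons_of_pos (by simp [mp, h])]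
      simp [solveGoL, h]
    · rw [List.filter_cons_of_neg (by simp [mp]; simpa using h)]
      cases m <;> simp [solveGoL, h, ih]

-- mismatch = true, found = false, remaining indices consecutive from c:
-- result ⟺ the remaining mismatch indices are an initial consecutive prefix
theorem solveGoL_run (cs : List Char) (k : Nat) (c : Int) :
    solveGoL cs (rngI c k) true false
      = decide ((rngI c k).filter (mp cs) = rngI c ((rngI c k).filter (mp cs)).length) := by
  induction k generalizing c with
  | zero => simp [rngI, solveGoL]
  | succ k ih =>
    rw [rngI_succ]
    by_cases h : PySem.List.pyGet? cs c ≠ PySem.List.pyGet? cs (-c - 1)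
    · rw [List.filter_cons_of_pos (by simp [mp, h])]
      have hL : ((c :: (rngI (c+1) k).filter (mp cs)).length)
          = ((rngI (c+1) k).filter (mp cs)).length + 1 := by simp
      rw [hL, rngI_succ]
      simp only [solveGoL, if_pos h, Bool.false_eq_true, if_neg (by simp : ¬False), ih (c+1)]
      rw [decide_eq_decide]
      simp
    · rw [List.filter_cons_of_neg (by simp [mp]; simpa using h)]
      simp only [solveGoL, if_neg h, if_pos (by simp : True), solveGoL_found]
      rw [decide_eq_decide]
      constructor
      · intro he; rw [he]; simp [rngI]
      · intro he
        cases hF : (rngI (c+1) k).filter (mp cs) with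
        | nil => rfl
        | cons x r =>
          exfalso
          rw [hF] at he
          rw [List.length_cons, rngI_succ] at he
          have hx : x = c := ((List.cons.injEq _ _ _ _).mp he).1
          have hxm : x ∈ (rngI (c+1) k).filter (mp cs) := by rw [hF]; exact List.mem_cons_self ..
          have := mem_rngI (List.mem_of_mem_filter hxm)
          omega

-- initial state: result ⟺ the mismatch indices form one contiguous run
theorem solveGoL_block (cs : List Char) (k : Nat) (a : Int) :
    solveGoL cs (rngI a k) false false = isRunB ((rngI a k).filter (mp cs)) := by
  induction k generalizing a with
  | zero => simp [rngI, solveGoL, isRunB]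
  | succ k ih =>
    rw [rngI_succ]
    by_cases h : PySem.List.pyGet? cs a ≠ PySem.List.pyGet? cs (-a - 1)
    · rw [List.filter_cons_of_pos (by simp [mp, h])]
      simp only [solveGoL, if_pos h, Bool.false_eq_true, if_neg (by simp : ¬False),
        solveGoL_run cs k (a + 1), isRunB]
      rw [decide_eq_decide, rngI_succ]
      simp
    · rw [List.filter_cons_of_neg (by simp [mp]; simpa using h)]
      simp only [solveGoL, if_neg h, Bool.false_eq_true, if_neg (by simp : ¬False), ih (a+1)]

-- B's contiguity test agrees with isRunB on any nonempty index list
theorem alt_check_eq_isRunB (a : Int) (rest : List Int) :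
    decide (a :: rest = PySem.List.pyRange a (rest.getLastD a + 1) 1)
      = isRunB (a :: rest) := by
  simp only [isRunB]
  rw [decide_eq_decide]
  constructor
  · intro he
    rw [pyRange_eq_rngI] at he
    have hlen : (rest.getLastD a + 1 - a).toNat = rest.length + 1 := by
      have := congrArg List.length he
      simp only [rngI, List.length_map, List.length_range, List.length_cons] at this
      omega
    rwa [hlen] at he
  · intro he
    have hrest : rest = rngI (a + 1) rest.length := by
      rw [rngI_succ] at he
      exact ((List.cons.injEq _ _ _ _).mp he).2
    have hlast : rest.getLastD a = a + rest.length := by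
      cases hm : rest.length with
      | zero =>
        have : rest = [] := List.eq_nil_of_length_eq_zero hm
        simp [this]
      | succ m =>
        rw [hrest, hm, rngI_getLastD]
        push_cast
        ring
    rw [pyRange_eq_rngI, hlast]
    have h2 : (a + (rest.length : Int) + 1 - a).toNat = rest.length + 1 := by omega
    rw [h2]
    exact he

-- ===== VERDICT (by name: the statement is the Claim_ definition above) =====
theorem solve_spec : Claim_equal_solve := by
  intro n s _ hpre
  unfold Pre_solve at hpre
  unfold Spec_solve solve solve_alt
  have hk : (0 : Int) + (PySem.Int.floordiv n 2).toNat ≤ s.toList.length := by omega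
  rw [solveGo_eq_solveGoL s.toList _ 0 false false (by omega) hk, solveGoL_block,
    altIdx_eq_filter s.toList _ 0 (by omega) hk]
  cases List.filter (mp s.toList) (rngI 0 (PySem.Int.floordiv n 2).toNat) with
  | nil => simp [isRunB]
  | cons a rest => exact (alt_check_eq_isRunB a rest).symm
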